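-- pv_equiv track=rewrite | github.com/SMTG-Bham/sumo | vaspy/electronic_structure/dos.py | sort_orbitals
-- ===== SOURCE A (Python) =====
-- def sort_orbitals(element_pdos):
--     """Sort the orbitals of an element's projected DOS.
--
--     Sorts the orbitals based on a standard format. E.g. s -> p -> d.
--     Will also sort lm decomposed orbitals. This is useful for plotting/saving.
--
--     Args:
--         element_pdos: An element pdos in the form {Orbital: Dos}. For example:
--             {'s': Dos, 'px': Dos}
--
--     Returns:
--         A list of the sorted orbitals
--     """
--     sorted_orbitals = ['s', 'p', 'py', 'pz', 'px',
--                        'd', 'dxy', 'dyz', 'dz2', 'dxz', 'dx2',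
--                        'f', 'f_3', 'f_2', 'f_1', 'f_0', 'f1', 'f2', 'f3']
--     sorted_keys = []
--     unsorted_keys = element_pdos.keys()
--     for key in sorted_orbitals:
--         if key in unsorted_keys:
--             sorted_keys.append(key)
--     return sorted_keys
-- ===== SOURCE B (Python) =====
-- def sort_orbitals(element_pdos):
--     """Sort the orbitals of an element's projected DOS (index-table variant)."""
--     canon = ['s', 'p', 'py', 'pz', 'px',
--              'd', 'dxy', 'dyz', 'dz2', 'dxz', 'dx2',
--              'f', 'f_3', 'f_2', 'f_1', 'f_0', 'f1', 'f2', 'f3']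
--     rank = {orb: i for i, orb in enumerate(canon)}
--     return sorted((k for k in element_pdos if k in rank), key=rank.__getitem__)
-- ===== Notes on version B (the rewrite author's own statement) =====
-- stated objective: idiomatic
-- what changed: B builds a rank dict mapping each canonical orbital to its index once, then filters the input keys to known orbitals and sorts them by looked-up rank, instead of A's scan over the canonical list testing membership in the input keys.
import Mathlib
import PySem

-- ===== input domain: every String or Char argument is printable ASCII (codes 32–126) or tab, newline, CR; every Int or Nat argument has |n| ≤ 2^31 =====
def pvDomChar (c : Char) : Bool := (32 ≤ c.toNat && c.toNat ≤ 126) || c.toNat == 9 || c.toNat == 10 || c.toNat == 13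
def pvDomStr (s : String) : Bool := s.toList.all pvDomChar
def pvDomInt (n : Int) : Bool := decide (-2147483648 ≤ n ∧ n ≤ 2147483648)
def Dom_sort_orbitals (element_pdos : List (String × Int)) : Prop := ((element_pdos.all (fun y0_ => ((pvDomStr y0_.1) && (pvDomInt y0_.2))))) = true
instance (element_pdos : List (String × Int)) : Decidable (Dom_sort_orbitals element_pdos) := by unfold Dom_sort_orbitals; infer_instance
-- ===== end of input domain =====

-- B builds an index table over the canonical orbital list and sorts the present keys by rank,
-- instead of A's scan over the canonical list filtering by membership (objective: idiomatic; same result).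

-- ===== PORT A =====
-- the canonical orbital order (the literal list in A)
def pvCanon : List String :=
  ["s", "p", "py", "pz", "px",
   "d", "dxy", "dyz", "dz2", "dxz", "dx2",
   "f", "f_3", "f_2", "f_1", "f_0", "f1", "f2", "f3"]

def sort_orbitals (element_pdos : List (String × Int)) : List String :=
  let sorted_orbitals := pvCanon
  let unsorted_keys := PySem.List.dedup (element_pdos.map Prod.fst)  -- element_pdos.keys()
  sorted_orbitals.foldl
    (fun sorted_keys key => if key ∈ unsorted_keys then sorted_keys ++ [key] else sorted_keys) []

-- ===== PORT B =====
-- rank = {orb: i for i, orb in enumerate(canon)}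
def pvRank : PySem.Dict String Int :=
  PySem.Dict.ofList ((PySem.List.enumerate pvCanon).map (fun p => (p.2, p.1)))

def sort_orbitals_alt (element_pdos : List (String × Int)) : List String :=
  PySem.List.sorted
    ((PySem.List.dedup (element_pdos.map Prod.fst)).filter (fun k => pvRank.contains k))
    (fun k => pvRank.getD k 0) false

-- ===== PRECONDITION & SPEC =====
def Spec_sort_orbitals (element_pdos : List (String × Int)) (out : List String) : Prop := out = sort_orbitals_alt element_pdos
instance (element_pdos : List (String × Int)) (out : List String) : Decidable (Spec_sort_orbitals element_pdos out) := by unfold Spec_sort_orbitals; infer_instance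

-- ===== CLAIM (what is proved, stated in full; the proofs are below) =====
def Claim_equal_sort_orbitals : Prop := ∀ (element_pdos : List (String × Int)), Dom_sort_orbitals element_pdos → Spec_sort_orbitals element_pdos (sort_orbitals element_pdos)

-- ===== LEMMAS AND PROOFS =====

-- membership in the rank table is membership in the canonical list
lemma keys_pvRank : pvRank.keys = pvCanon := by decide

lemma contains_pvRank (k : String) : pvRank.contains k = decide (k ∈ pvCanon) := by
  rw [PySem.Dict.contains_eq_decide_mem_keys, keys_pvRank]

-- the canonical list is strictly increasing under its own rank
lemma pairwise_pvCanon : pvCanon.Pairwise (fun a b => pvRank.getD a 0 < pvRank.getD b 0) := by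
  decide

lemma nodup_pvCanon : pvCanon.Nodup := by decide

lemma perm_key (keys : List String) (hnd : keys.Nodup) :
    (pvCanon.filter (fun k => decide (k ∈ keys))).Perm
      (keys.filter (fun k => pvRank.contains k)) := by
  apply (List.perm_ext_iff_of_nodup (nodup_pvCanon.filter _) (hnd.filter _)).mpr
  intro x
  simp [contains_pvRank]
  tauto

lemma main_eq (l : List (String × Int)) : sort_orbitals l = sort_orbitals_alt l := by
  unfold sort_orbitals sort_orbitals_alt
  rw [PySem.List.foldl_append_ite_eq_filter, List.nil_append]
  exact Eq.symm (PySem.List.sorted_eq_of_perm_of_pairwise_lt _ _ _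
    (perm_key _ (PySem.List.nodup_dedup _))
    (List.Pairwise.sublist List.filter_sublist pairwise_pvCanon))

-- ===== VERDICT (by name: the statement is the Claim_ definition above) =====
theorem sort_orbitals_spec : Claim_equal_sort_orbitals := by
  intro l _
  unfold Spec_sort_orbitals
  exact main_eq l
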